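-- pv_equiv track=rewrite | github.com/sophie727/MIT-6.009 | lab5_recipes/lab.py | all_flat_recipes_helper_function
-- ===== SOURCE A (Python) =====
-- def scaled_flat_recipe(flat_recipe, n):
--     """
--     Given a dictionary of ingredients mapped to quantities needed, returns a
--     new dictionary with the quantities scaled by n.
--     """
--     return {
--         ingredient: flat_recipe[ingredient] * n
--         for ingredient in flat_recipe
--     }
--
-- def add_flat_recipes(flat_recipes):
--     """
--     Given a list of flat_recipe dictionaries that map food items to quantities,
--     return a new overall 'grocery list' dictionary that maps each ingredient name
--     to the sum of its quantities across the given flat recipes.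
--
--     For example,
--         add_flat_recipes([{'milk':1, 'chocolate':1}, {'sugar':1, 'milk':2}])
--     should return:
--         {'milk':3, 'chocolate': 1, 'sugar': 1}
--     """
--     summed_flat_recipes = {}
--     for flat_recipe in flat_recipes:
--         for ingredient in flat_recipe:
--             amt = flat_recipe[ingredient]
--             if ingredient in summed_flat_recipes:
--                 summed_flat_recipes[ingredient] += amt
--             else:
--                 summed_flat_recipes[ingredient] = amt
--     return summed_flat_recipes
--
-- def combined_flat_recipes(flat_recipes):
--     """
--     Given a list of lists of dictionaries, where each inner list represents all
--     the flat recipes for a certain ingredient, compute and return a list of flat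
--     recipe dictionaries that represent all the possible combinations of
--     ingredient recipes.
--     """
--     # we'll calculate this recursively.
--
--     # base case
--     if not flat_recipes:
--         return []
--     if len(flat_recipes) == 1:
--         return flat_recipes[0]
--     # recursive case
--     combined = []
--     ingredient1 = flat_recipes[0]
--     other_ingredients = combined_flat_recipes(flat_recipes[1:])
--     for ingredient1_method in ingredient1:
--         for other_method in other_ingredients:
--             combined.append(add_flat_recipes([ingredient1_method, other_method]))
--     return combined
--
-- def all_flat_recipes_helper_function(atomics, compounds, curr_food_item, forbidden):
--     """
--     Helper function for all_flat_recipes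
--     INPUT: atomics (dict of ints), compounds (dict of lists of lists),
--            curr_food_item (str)
--     OUTPUT: lowest cost of making curr_food_item
--     """
--     # base case: the item in question is forbidden, an atomic, or nonexistent
--     if curr_food_item in forbidden:
--         return []
--     if curr_food_item in atomics:
--         return [{curr_food_item: 1}]
--     if curr_food_item not in compounds:
--         return []
--     # recursive case: item in question is not atomic
--     flat_recipes = []
--     for cooking_method in compounds[curr_food_item]:
--         method_success = True
--         cooking_method_recipes = []
--         for (food, amount) in cooking_method:
--             food_recipes = all_flat_recipes_helper_function(atomics, compounds, food, forbidden)
--             if not food_recipes: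
--                 method_success = False
--                 break
--             scaled_food_recipes = [
--                 scaled_flat_recipe(food_recipe, amount)
--                 for food_recipe in food_recipes
--             ]
--             cooking_method_recipes.append(scaled_food_recipes)
--         if method_success:
--             cooking_method_recipes = combined_flat_recipes(cooking_method_recipes)
--             for recipe in cooking_method_recipes:
--                 flat_recipes.append(recipe)
--
--     return flat_recipes
-- ===== SOURCE B (Python) =====
-- def scale(recipe, n):
--     return {ing: qty * n for ing, qty in recipe.items()}
--
-- def merge_into(left, right):
--     out = dict(left)
--     for ing, qty in right.items():
--         out[ing] = out.get(ing, 0) + qty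
--     return out
--
-- def expand_method(atomics, compounds, forbidden, method):
--     """All flat recipes for the ingredient list `method`, scanning left to
--     right and stopping at the first ingredient that has no recipes."""
--     if not method:
--         return []
--     (food, amount) = method[0]
--     subs = all_flat_recipes_helper_function(atomics, compounds, food, forbidden)
--     if not subs:
--         return []
--     scaled = [scale(sub, amount) for sub in subs]
--     if len(method) == 1:
--         return scaled
--     rest = expand_method(atomics, compounds, forbidden, method[1:])
--     return [merge_into(s, r) for s in scaled for r in rest]
--
-- def all_flat_recipes_helper_function(atomics, compounds, curr_food_item, forbidden):
--     if curr_food_item in forbidden: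
--         return []
--     if curr_food_item in atomics:
--         return [{curr_food_item: 1}]
--     if curr_food_item not in compounds:
--         return []
--     results = []
--     for method in compounds[curr_food_item]:
--         results.extend(expand_method(atomics, compounds, forbidden, method))
--     return results
-- ===== Notes on version B (the rewrite author's own statement) =====
-- stated objective: alternative
-- what changed: B drops A's helper pipeline (collect per-ingredient scaled recipe lists, then recursively cross-combine them with pairwise dict addition via combined_flat_recipes/add_flat_recipes) and instead expands each cooking method with one recursive left-to-right pass that merges each scaled sub-recipe into the partial products as it goes, stopping at the first ingredient with no recipes exactly as A's break does.
-- outside the precondition, e.g. on all_flat_recipes_helper_function({}, {'x': [[('u', 1), ('x', 1)]]}, 'x', set()): A returns [], B returns []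
import Mathlib
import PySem

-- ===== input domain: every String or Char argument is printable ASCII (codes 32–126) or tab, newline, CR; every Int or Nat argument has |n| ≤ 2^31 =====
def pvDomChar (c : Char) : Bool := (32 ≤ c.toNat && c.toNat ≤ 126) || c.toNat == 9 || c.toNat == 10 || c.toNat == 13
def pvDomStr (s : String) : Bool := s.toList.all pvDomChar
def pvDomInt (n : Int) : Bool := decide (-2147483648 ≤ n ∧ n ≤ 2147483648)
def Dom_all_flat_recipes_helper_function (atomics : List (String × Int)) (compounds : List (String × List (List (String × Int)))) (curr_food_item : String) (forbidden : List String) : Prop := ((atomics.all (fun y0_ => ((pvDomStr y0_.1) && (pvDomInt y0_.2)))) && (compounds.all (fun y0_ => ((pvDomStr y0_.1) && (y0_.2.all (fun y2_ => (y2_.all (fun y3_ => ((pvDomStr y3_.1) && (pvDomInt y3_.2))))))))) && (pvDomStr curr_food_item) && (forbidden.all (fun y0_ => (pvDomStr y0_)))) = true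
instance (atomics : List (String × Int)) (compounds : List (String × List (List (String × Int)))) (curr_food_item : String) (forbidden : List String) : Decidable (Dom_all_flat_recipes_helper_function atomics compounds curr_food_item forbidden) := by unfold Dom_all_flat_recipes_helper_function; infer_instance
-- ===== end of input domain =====

-- B replaces A's helper pipeline (collect per-ingredient scaled recipe lists, then recursively
-- cross-combine them with pairwise dict addition via combined_flat_recipes/add_flat_recipes) by
-- one recursive left-to-right expansion of each cooking method that merges each scaled
-- sub-recipe into the partial products as it goes, stopping (like A's break) at the first
-- ingredient with no recipes; objective: alternative.
-- Both ports take fuel compounds.length + 1, enough whenever the recursion terminates; on a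
-- dependency cycle actually entered, both Pythons raise RecursionError (excluded by Pre_).

-- ===== PORT A =====
def pyScaledFlatRecipe (r : List (String × Int)) (n : Int) : List (String × Int) :=
  r.map (fun p => (p.1, p.2 * n))

-- one ingredient of add_flat_recipes' inner loop (if/else on prior presence)
def pyAddStep (d : PySem.Dict String Int) (p : String × Int) : PySem.Dict String Int :=
  match d.get? p.1 with
  | some v => d.insert p.1 (v + p.2)
  | none => d.insert p.1 p.2

def pyAddFlatRecipes (rs : List (List (String × Int))) : List (String × Int) :=
  (rs.foldl (fun d r => r.foldl pyAddStep d) PySem.Dict.empty).items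

def pyCombinedFlatRecipes : List (List (List (String × Int))) → List (List (String × Int))
  | [] => []
  | [l] => l
  | l :: r :: rest =>
    l.flatMap (fun m => (pyCombinedFlatRecipes (r :: rest)).map (fun o => pyAddFlatRecipes [m, o]))

-- the body of A's inner `for (food, amount) in cooking_method` loop (break ≙ frozen state)
def innerStepA (g : String → List (List (String × Int)))
    (st : Bool × List (List (List (String × Int)))) (p : String × Int) :
    Bool × List (List (List (String × Int))) :=
  match st with
  | (false, acc) => (false, acc)
  | (true, acc) =>
    let fr := g p.1
    if fr.isEmpty then (false, acc)
    else (true, acc ++ [fr.map (fun q => pyScaledFlatRecipe q p.2)])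

def goA (atomics : List (String × Int)) (compounds : List (String × List (List (String × Int))))
    (forbidden : List String) : Nat → String → List (List (String × Int))
  | 0, _ => []
  | (fuel+1), cur =>
    if forbidden.contains cur then []
    else if (PySem.Dict.mk atomics).contains cur then [[(cur, 1)]]
    else
      match (PySem.Dict.mk compounds).get? cur with
      | none => []
      | some methods =>
        methods.foldl (fun flat method =>
          let st := method.foldl (innerStepA (goA atomics compounds forbidden fuel)) (true, [])
          if st.1 then flat ++ pyCombinedFlatRecipes st.2 else flat) []

def all_flat_recipes_helper_function (atomics : List (String × Int)) (compounds : List (String × List (List (String × Int)))) (curr_food_item : String) (forbidden : List String) : List (List (String × Int)) :=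
  goA atomics compounds forbidden (compounds.length + 1) curr_food_item

-- ===== PORT B =====
def altScale (r : List (String × Int)) (n : Int) : List (String × Int) :=
  r.map (fun p => (p.1, p.2 * n))

def altMergeInto (left right : List (String × Int)) : List (String × Int) :=
  (right.foldl (fun d p => d.insert p.1 (d.getD p.1 0 + p.2)) (PySem.Dict.mk left)).items

-- B's expand_method: recursion over the ingredient list, given the recursive call g
def expandB (g : String → List (List (String × Int))) : List (String × Int) → List (List (String × Int))
  | [] => []
  | p :: rest =>
    let subs := g p.1
    if subs.isEmpty then []
    else
      let scaled := subs.map (fun s => altScale s p.2)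
      match rest with
      | [] => scaled
      | q :: rest' =>
        scaled.flatMap (fun s => (expandB g (q :: rest')).map (fun r => altMergeInto s r))

def goB (atomics : List (String × Int)) (compounds : List (String × List (List (String × Int))))
    (forbidden : List String) : Nat → String → List (List (String × Int))
  | 0, _ => []
  | (fuel+1), cur =>
    if forbidden.contains cur then []
    else if (PySem.Dict.mk atomics).contains cur then [[(cur, 1)]]
    else
      match (PySem.Dict.mk compounds).get? cur with
      | none => []
      | some methods =>
        methods.flatMap (expandB (goB atomics compounds forbidden fuel))

def all_flat_recipes_helper_function_alt (atomics : List (String × Int)) (compounds : List (String × List (List (String × Int)))) (curr_food_item : String) (forbidden : List String) : List (List (String × Int)) :=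
  goB atomics compounds forbidden (compounds.length + 1) curr_food_item

-- ===== PRECONDITION & SPEC =====
-- active dependency edges: the ingredients the recursion may enter from item k (forbidden and
-- atomic items, and items with no compound entry, are leaves)
def pvActiveEdges (atomics : List (String × Int)) (compounds : List (String × List (List (String × Int)))) (forbidden : List String) (k : String) : List String :=
  if forbidden.contains k then []
  else if (PySem.Dict.mk atomics).contains k then []
  else
    match (PySem.Dict.mk compounds).get? k with
    | none => []
    | some ms => (ms.flatMap id).map Prod.fst

-- is there an active path of ≤ n edges from a to b?
def pvReaches (atomics : List (String × Int)) (compounds : List (String × List (List (String × Int)))) (forbidden : List String) : Nat → String → String → Bool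
  | 0, a, b => a == b
  | (n+1), a, b => a == b || (pvActiveEdges atomics compounds forbidden a).any (fun c => pvReaches atomics compounds forbidden n c b)

-- Pre_ excludes the inputs whose active ingredient-dependency graph reachable from
-- curr_food_item contains a cycle: on those inputs Python A raises RecursionError when the
-- recursion enters the cycle (and B raises there too, since it scans ingredients in the same
-- order with the same early stop); the condition is conservative — when an earlier ingredient
-- without recipes stops the recursion before the cycle, A and B both return (the same value),
-- which a closed-form condition on the graph cannot distinguish.
def Pre_all_flat_recipes_helper_function (atomics : List (String × Int)) (compounds : List (String × List (List (String × Int)))) (curr_food_item : String) (forbidden : List String) : Prop :=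
  ∀ k ∈ compounds.map Prod.fst,
    pvReaches atomics compounds forbidden (compounds.length + 1) curr_food_item k = true →
    (pvActiveEdges atomics compounds forbidden k).all
      (fun c => !pvReaches atomics compounds forbidden compounds.length c k) = true
instance (atomics : List (String × Int)) (compounds : List (String × List (List (String × Int)))) (curr_food_item : String) (forbidden : List String) : Decidable (Pre_all_flat_recipes_helper_function atomics compounds curr_food_item forbidden) := by unfold Pre_all_flat_recipes_helper_function; infer_instance

def pvWitness_all_flat_recipes_helper_function : (List (String × Int)) × (List (String × List (List (String × Int)))) × String × List String :=
  ([("milk", 1), ("sugar", 1)],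
   [("cake", [[("milk", 2), ("sugar", 3)], [("milk", 5)]])],
   "cake", ["butter"])

def Spec_all_flat_recipes_helper_function (atomics : List (String × Int)) (compounds : List (String × List (List (String × Int)))) (curr_food_item : String) (forbidden : List String) (out : List (List (String × Int))) : Prop := out = all_flat_recipes_helper_function_alt atomics compounds curr_food_item forbidden
instance (atomics : List (String × Int)) (compounds : List (String × List (List (String × Int)))) (curr_food_item : String) (forbidden : List String) (out : List (List (String × Int))) : Decidable (Spec_all_flat_recipes_helper_function atomics compounds curr_food_item forbidden out) := by unfold Spec_all_flat_recipes_helper_function; infer_instance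

-- ===== CLAIM (what is proved, stated in full; the proofs are below) =====
def Claim_equal_all_flat_recipes_helper_function : Prop := ∀ (atomics : List (String × Int)) (compounds : List (String × List (List (String × Int)))) (curr_food_item : String) (forbidden : List String), Dom_all_flat_recipes_helper_function atomics compounds curr_food_item forbidden → Pre_all_flat_recipes_helper_function atomics compounds curr_food_item forbidden → Spec_all_flat_recipes_helper_function atomics compounds curr_food_item forbidden (all_flat_recipes_helper_function atomics compounds curr_food_item forbidden)

-- ===== LEMMAS AND PROOFS =====

theorem pvWitness_ok :
    Dom_all_flat_recipes_helper_function pvWitness_all_flat_recipes_helper_function.1 pvWitness_all_flat_recipes_helper_function.2.1 pvWitness_all_flat_recipes_helper_function.2.2.1 pvWitness_all_flat_recipes_helper_function.2.2.2 ∧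
    Pre_all_flat_recipes_helper_function pvWitness_all_flat_recipes_helper_function.1 pvWitness_all_flat_recipes_helper_function.2.1 pvWitness_all_flat_recipes_helper_function.2.2.1 pvWitness_all_flat_recipes_helper_function.2.2.2 := by
  constructor <;> decide

-- A's add-step IS an insert of the summed value
theorem pyAddStep_eq (d : PySem.Dict String Int) (p : String × Int) :
    pyAddStep d p = d.insert p.1 (d.getD p.1 0 + p.2) := by
  unfold pyAddStep
  cases h : d.get? p.1 <;> simp [PySem.Dict.getD_eq_get?_getD, h]

theorem pyAddStep_funext : pyAddStep = fun d p => d.insert p.1 (d.getD p.1 0 + p.2) :=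
  funext fun d => funext fun p => pyAddStep_eq d p

theorem scaled_keys (q : List (String × Int)) (n : Int) :
    (pyScaledFlatRecipe q n).map Prod.fst = q.map Prod.fst := by
  simp [pyScaledFlatRecipe]

-- folding A's add-step over a keys-Nodup list starting from a disjoint dict appends it
theorem foldl_pyAddStep (m : List (String × Int)) :
    ∀ l : List (String × Int), ((l ++ m).map Prod.fst).Nodup →
      m.foldl pyAddStep (PySem.Dict.mk l) = PySem.Dict.mk (l ++ m) := by
  induction m with
  | nil => intro l _; simp
  | cons p m ih =>
    intro l hnd
    have hnotmem : p.1 ∉ l.map Prod.fst := by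
      rw [List.map_append] at hnd
      have := (List.nodup_append.mp hnd).2.2
      intro hmem
      exact this p.1 hmem p.1 (by simp) rfl
    have hget : (PySem.Dict.mk l).get? p.1 = none := by
      rw [PySem.Dict.get?_eq_none_iff_not_mem_keys]
      simpa using hnotmem
    have hstep : pyAddStep (PySem.Dict.mk l) p = PySem.Dict.mk (l ++ [p]) := by
      unfold pyAddStep
      rw [hget]
      apply PySem.Dict.ext
      rw [PySem.Dict.items_insert_of_not_contains]
      rw [PySem.Dict.contains_eq_isSome_get?, hget]
      rfl
    rw [List.foldl_cons, hstep, ih (l ++ [p]) (by simpa using hnd)]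
    simp

-- A's pairwise dict addition is B's merge, for a left operand with distinct keys
theorem pyAddFlat_pair (m o : List (String × Int)) (hm : (m.map Prod.fst).Nodup) :
    pyAddFlatRecipes [m, o] = altMergeInto m o := by
  unfold pyAddFlatRecipes altMergeInto
  have h1 : m.foldl pyAddStep PySem.Dict.empty = PySem.Dict.mk m := by
    have := foldl_pyAddStep m [] (by simpa using hm)
    simpa [PySem.Dict.empty] using this
  simp only [List.foldl_cons, List.foldl_nil, h1]
  rw [pyAddStep_funext]

theorem nodup_keys_foldl_pyAddStep (r : List (String × Int)) (d : PySem.Dict String Int)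
    (hd : d.keys.Nodup) : (r.foldl pyAddStep d).keys.Nodup := by
  rw [pyAddStep_funext]
  exact PySem.Dict.nodup_keys_foldl_insert_key r Prod.fst (fun d a => d.getD a.1 0 + a.2) d hd

theorem pyAddFlat_nodup (rs : List (List (String × Int))) :
    ((pyAddFlatRecipes rs).map Prod.fst).Nodup := by
  unfold pyAddFlatRecipes
  have : ∀ (d : PySem.Dict String Int), d.keys.Nodup →
      (rs.foldl (fun d r => r.foldl pyAddStep d) d).keys.Nodup := by
    induction rs with
    | nil => intro d hd; simpa using hd
    | cons r rs ih =>
      intro d hd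
      exact ih _ (nodup_keys_foldl_pyAddStep r d hd)
  have h := this PySem.Dict.empty PySem.Dict.nodup_keys_empty
  simpa [PySem.Dict.keys] using h

theorem combined_nodup (ls : List (List (List (String × Int))))
    (h : ∀ l ∈ ls, ∀ r ∈ l, (r.map Prod.fst).Nodup) :
    ∀ r ∈ pyCombinedFlatRecipes ls, (r.map Prod.fst).Nodup := by
  match ls with
  | [] => intro r hr; simp [pyCombinedFlatRecipes] at hr
  | [l] =>
    intro r hr
    exact h l (by simp) r (by simpa [pyCombinedFlatRecipes] using hr)
  | l :: r' :: rest =>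
    intro r hr
    simp only [pyCombinedFlatRecipes, List.mem_flatMap, List.mem_map] at hr
    obtain ⟨m, _, o, _, rfl⟩ := hr
    exact pyAddFlat_nodup [m, o]

-- A's outer loop, restructured as a flatMap
theorem foldl_outerA (g : String → List (List (String × Int)))
    (ms : List (List (String × Int))) :
    ∀ acc : List (List (String × Int)),
      ms.foldl (fun flat method =>
          let st := method.foldl (innerStepA g) (true, [])
          if st.1 then flat ++ pyCombinedFlatRecipes st.2 else flat) acc
        = acc ++ ms.flatMap (fun method =>
            let st := method.foldl (innerStepA g) (true, [])
            if st.1 then pyCombinedFlatRecipes st.2 else []) := by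
  induction ms with
  | nil => intro acc; simp
  | cons m ms ih =>
    intro acc
    rw [List.foldl_cons, List.flatMap_cons, ih]
    by_cases h : (m.foldl (innerStepA g) (true, [])).1 <;> simp [h]

-- A's inner loop stays frozen once the flag dropped
theorem innerA_frozen (g : String → List (List (String × Int))) (method : List (String × Int)) :
    ∀ acc, method.foldl (innerStepA g) (false, acc) = (false, acc) := by
  induction method with
  | nil => intro acc; rfl
  | cons p m ih => intro acc; rw [List.foldl_cons]; exact ih acc

-- A's inner loop when every ingredient has recipes
theorem innerA_all (g : String → List (List (String × Int))) (method : List (String × Int))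
    (h : ∀ p ∈ method, g p.1 ≠ []) :
    ∀ acc, method.foldl (innerStepA g) (true, acc)
      = (true, acc ++ method.map (fun p => (g p.1).map (fun q => pyScaledFlatRecipe q p.2))) := by
  induction method with
  | nil => intro acc; simp
  | cons p m ih =>
    intro acc
    have hp : (g p.1).isEmpty = false := by
      rw [List.isEmpty_eq_false_iff]
      exact h p (by simp)
    rw [List.foldl_cons]
    show m.foldl (innerStepA g) (innerStepA g (true, acc) p) = _
    rw [show innerStepA g (true, acc) p
        = (true, acc ++ [(g p.1).map (fun q => pyScaledFlatRecipe q p.2)]) by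
      simp [innerStepA, hp]]
    rw [ih (fun q hq => h q (by simp [hq]))]
    simp

-- A's inner loop when some ingredient has none
theorem innerA_fail (g : String → List (List (String × Int))) (method : List (String × Int))
    (h : ∃ p ∈ method, g p.1 = []) :
    ∀ acc, (method.foldl (innerStepA g) (true, acc)).1 = false := by
  induction method with
  | nil => simp at h
  | cons p m ih =>
    intro acc
    rw [List.foldl_cons]
    by_cases hp : (g p.1).isEmpty
    · rw [show innerStepA g (true, acc) p = (false, acc) by simp [innerStepA, hp]]
      rw [innerA_frozen]
    · have hp' : g p.1 ≠ [] := by simpa [List.isEmpty_eq_false_iff] using hp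
      rw [show innerStepA g (true, acc) p
          = (true, acc ++ [(g p.1).map (fun q => pyScaledFlatRecipe q p.2)]) by
        simp [innerStepA, hp]]
      apply ih
      obtain ⟨q, hq, hq2⟩ := h
      rcases List.mem_cons.mp hq with rfl | hq
      · exact absurd hq2 hp'
      · exact ⟨q, hq, hq2⟩

-- membership in the inner loop's accumulator
theorem innerA_mem (g : String → List (List (String × Int))) (method : List (String × Int)) :
    ∀ st l, l ∈ (method.foldl (innerStepA g) st).2 →
      l ∈ st.2 ∨ ∃ p ∈ method, l = (g p.1).map (fun q => pyScaledFlatRecipe q p.2) := by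
  induction method with
  | nil => intro st l hl; exact Or.inl hl
  | cons p m ih =>
    intro st l hl
    rw [List.foldl_cons] at hl
    rcases ih _ l hl with hmem | ⟨q, hq, rfl⟩
    · obtain ⟨flag, acc⟩ := st
      cases flag
      · exact Or.inl hmem
      · by_cases hp : (g p.1).isEmpty
        · simp [innerStepA, hp] at hmem
          exact Or.inl hmem
        · simp [innerStepA, hp] at hmem
          rcases hmem with hmem | rfl
          · exact Or.inl hmem
          · exact Or.inr ⟨p, by simp, rfl⟩
    · exact Or.inr ⟨q, by simp [hq], rfl⟩

theorem altScale_eq_pyScaled : altScale = pyScaledFlatRecipe := rfl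

-- B's expansion when some ingredient has no recipes: the left-to-right scan yields nothing
theorem expandB_fail (g : String → List (List (String × Int))) (method : List (String × Int))
    (h : ∃ p ∈ method, g p.1 = []) : expandB g method = [] := by
  induction method with
  | nil => simp at h
  | cons p m ih =>
    obtain ⟨q, hq, hq2⟩ := h
    by_cases hp : (g p.1).isEmpty
    · cases m <;> (rw [expandB]; simp [hp])
    · have hp' : g p.1 ≠ [] := by simpa [List.isEmpty_eq_false_iff] using hp
      rcases List.mem_cons.mp hq with rfl | hq
      · exact absurd hq2 hp'
      · have hm : m ≠ [] := by rintro rfl; simp at hq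
        obtain ⟨q', rest', rfl⟩ := List.exists_cons_of_ne_nil hm
        rw [expandB]
        simp only [hp, Bool.false_eq_true, if_false]
        rw [ih ⟨q, hq, hq2⟩]
        simp

-- the heart: A's recursive cross-combination = B's left-to-right expansion (success case)
theorem expandB_eq_combined (g : String → List (List (String × Int)))
    (hnd : ∀ s r, r ∈ g s → (r.map Prod.fst).Nodup) :
    ∀ method : List (String × Int), (∀ p ∈ method, g p.1 ≠ []) →
      expandB g method
        = pyCombinedFlatRecipes
            (method.map (fun p => (g p.1).map (fun q => pyScaledFlatRecipe q p.2))) := by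
  intro method
  induction method with
  | nil => intro _; rfl
  | cons p m ih =>
    intro h
    have hp : (g p.1).isEmpty = false := by
      rw [List.isEmpty_eq_false_iff]; exact h p (by simp)
    cases m with
    | nil =>
      simp only [List.map_cons, List.map_nil, pyCombinedFlatRecipes]
      rw [expandB]
      simp [hp, altScale_eq_pyScaled]
    | cons q rest =>
      rw [expandB]
      simp only [hp, Bool.false_eq_true, if_false, List.map_cons, pyCombinedFlatRecipes]
      rw [ih (fun r hr => h r (by simp [hr]))]
      simp only [List.map_cons] at *
      rw [List.flatMap_map, List.flatMap_map]
      apply List.flatMap_congr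
      intro s hs
      apply List.map_congr_left
      intro o _
      have hk : ((pyScaledFlatRecipe s p.2).map Prod.fst).Nodup := by
        rw [scaled_keys]; exact hnd p.1 s hs
      rw [altScale_eq_pyScaled]
      exact (pyAddFlat_pair (pyScaledFlatRecipe s p.2) o hk).symm

-- key invariant: every flat recipe A produces has distinct keys
theorem goA_nodup (atomics : List (String × Int)) (compounds : List (String × List (List (String × Int)))) (forbidden : List String) :
    ∀ fuel cur r, r ∈ goA atomics compounds forbidden fuel cur → (r.map Prod.fst).Nodup := by
  intro fuel
  induction fuel with
  | zero => intro cur r hr; simp [goA] at hr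
  | succ fuel ih =>
    intro cur r hr
    rw [goA] at hr
    split at hr
    · simp at hr
    · split at hr
      · simp at hr
        subst hr
        simp
      · split at hr
        · simp at hr
        · rename_i methods _
          rw [foldl_outerA] at hr
          simp only [List.nil_append, List.mem_flatMap] at hr
          obtain ⟨method, _, hr⟩ := hr
          split at hr
          · refine combined_nodup _ ?_ r hr
            intro l hl q hq
            rcases innerA_mem _ method (true, []) l hl with h0 | ⟨p, _, rfl⟩
            · simp at h0
            · rw [List.mem_map] at hq
              obtain ⟨w, hw, rfl⟩ := hq
              rw [scaled_keys]
              exact ih p.1 w hw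
          · simp at hr

theorem goA_eq_goB (atomics : List (String × Int)) (compounds : List (String × List (List (String × Int)))) (forbidden : List String) :
    ∀ fuel cur, goA atomics compounds forbidden fuel cur = goB atomics compounds forbidden fuel cur := by
  intro fuel
  induction fuel with
  | zero => intro cur; rfl
  | succ fuel ih =>
    intro cur
    have hg : goB atomics compounds forbidden fuel = goA atomics compounds forbidden fuel :=
      funext fun c => (ih c).symm
    rw [goA, goB, hg]
    split
    · rfl
    split
    · rfl
    cases hget : (PySem.Dict.mk compounds).get? cur with
    | none => rfl
    | some methods =>
      dsimp only
      rw [foldl_outerA, List.nil_append]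
      apply List.flatMap_congr
      intro method _
      by_cases hfail : ∃ p ∈ method, goA atomics compounds forbidden fuel p.1 = []
      · rw [expandB_fail _ _ hfail]
        have := innerA_fail (goA atomics compounds forbidden fuel) method hfail []
        simp only [this]
        rfl
      · push Not at hfail
        rw [innerA_all _ _ hfail []]
        rw [expandB_eq_combined _ (fun s r hr => goA_nodup atomics compounds forbidden fuel s r hr)
          method hfail]
        simp

-- ===== VERDICT (by name: the statement is the Claim_ definition above) =====
theorem all_flat_recipes_helper_function_spec : Claim_equal_all_flat_recipes_helper_function := by
  intro atomics compounds cur forbidden _hdom _hpre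
  unfold Spec_all_flat_recipes_helper_function all_flat_recipes_helper_function all_flat_recipes_helper_function_alt
  exact goA_eq_goB atomics compounds forbidden (compounds.length + 1) cur
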